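-- pv_equiv track=rewrite | github.com/amitibo/programming_exercises | EPI/e13_10.py | verify_photo
-- ===== SOURCE A (Python) =====
-- def verify_photo(team0, team1):
--     """Check if there is a "Producer sequence" connecting s to t."""
--
--     assert len(team0) == len(team1), "Team lengths should match."
--
--     team0 = sorted(team0)
--     team1 = sorted(team1)
--
--     if team1[-1] > team0[-1]:
--         temp = team1
--         team1 = team0
--         team0 = temp
--
--     i0, i1 = [0] * 2
--     while i1 < len(team1):
--         if team0[i0] > team1[i1]:
--             i1 += 1
--         elif team1[i1] > team0[i0]:
--             i0 += 1
--         else: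
--             i0 += 1
--             i1 += 1
--
--         if i1 < i0:
--             return False
--
--     return True
-- ===== SOURCE B (Python) =====
-- def verify_photo(team0, team1):
--     """Check if there is a "Producer sequence" connecting s to t."""
--
--     assert len(team0) == len(team1), "Team lengths should match."
--
--     team0 = sorted(team0)
--     team1 = sorted(team1)
--
--     if team1[-1] > team0[-1]:
--         team0, team1 = team1, team0
--
--     return all(a >= b for a, b in zip(team0, team1))
-- ===== Notes on version B (the rewrite author's own statement) =====
-- stated objective: simpler
-- what changed: After sorting and orienting the teams, the greedy two-pointer loop with independently advancing indices is replaced by a single lockstep elementwise domination check all(a >= b for a, b in zip(team0, team1)).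
import Mathlib
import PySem

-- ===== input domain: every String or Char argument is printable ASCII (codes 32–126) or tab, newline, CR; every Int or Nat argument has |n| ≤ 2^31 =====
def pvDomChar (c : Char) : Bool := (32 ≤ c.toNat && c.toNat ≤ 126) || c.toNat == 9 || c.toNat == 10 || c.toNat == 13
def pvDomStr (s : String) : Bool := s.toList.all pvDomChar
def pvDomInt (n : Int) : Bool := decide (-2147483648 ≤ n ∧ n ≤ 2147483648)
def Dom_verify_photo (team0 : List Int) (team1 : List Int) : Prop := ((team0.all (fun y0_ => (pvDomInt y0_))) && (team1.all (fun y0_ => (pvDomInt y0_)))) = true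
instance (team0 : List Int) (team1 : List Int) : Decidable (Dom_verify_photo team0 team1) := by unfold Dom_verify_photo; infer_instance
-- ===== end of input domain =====

-- B replaces A's greedy two-pointer while-loop (after sort+orient) with a single
-- lockstep elementwise comparison all(a >= b for a, b in zip(team0, team1)): simpler, same cost.


-- ===== PORT A =====
-- the while-loop of A: independent indices i0 (into team0) and i1 (into team1)
def verifyLoopA (t0 t1 : List Int) (i0 i1 : Nat) : Bool :=
  if h1 : i1 < t1.length then
    if h0 : i0 < t0.length then
      if t0[i0] > t1[i1] then
        if i1 + 1 < i0 then false else verifyLoopA t0 t1 i0 (i1 + 1)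
      else if t1[i1] > t0[i0] then
        if i1 < i0 + 1 then false else verifyLoopA t0 t1 (i0 + 1) i1
      else
        if i1 + 1 < i0 + 1 then false else verifyLoopA t0 t1 (i0 + 1) (i1 + 1)
    else false  -- Python IndexError team0[i0]; unreachable under Pre_ (see loop lemma)
  else true
termination_by (t0.length - i0) + (t1.length - i1)
decreasing_by all_goals omega

def verify_photo (team0 : List Int) (team1 : List Int) : Bool :=
  if team0.length = team1.length then  -- the assert; AssertionError excluded by Pre_
    let t0 := PySem.List.sorted team0 (fun x => x) false
    let t1 := PySem.List.sorted team1 (fun x => x) false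
    match PySem.List.pyGet? t1 (-1), PySem.List.pyGet? t0 (-1) with
    | some m1, some m0 =>
      if m1 > m0 then verifyLoopA t1 t0 0 0 else verifyLoopA t0 t1 0 0
    | _, _ => false  -- IndexError on the empty team; excluded by Pre_
  else false

-- ===== PORT B =====
def verify_photo_alt (team0 : List Int) (team1 : List Int) : Bool :=
  if team0.length = team1.length then  -- the assert; AssertionError excluded by Pre_
    let t0 := PySem.List.sorted team0 (fun x => x) false
    let t1 := PySem.List.sorted team1 (fun x => x) false
    match PySem.List.pyGet? t1 (-1) with
    | none => false  -- IndexError on the empty team; excluded by Pre_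
    | some m1 =>
      match PySem.List.pyGet? t0 (-1) with
      | none => false  -- IndexError on the empty team; excluded by Pre_
      | some m0 =>
        if m1 > m0 then (t1.zip t0).all (fun p => p.1 ≥ p.2)
        else (t0.zip t1).all (fun p => p.1 ≥ p.2)
  else false

-- ===== PRECONDITION & SPEC =====
-- A (and B) raise AssertionError on length mismatch and IndexError (team1[-1]) on empty teams.
def Pre_verify_photo (team0 : List Int) (team1 : List Int) : Prop :=
  team0.length = team1.length ∧ team0 ≠ []
instance (team0 : List Int) (team1 : List Int) : Decidable (Pre_verify_photo team0 team1) := by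
  unfold Pre_verify_photo; infer_instance
def pvWitness_verify_photo : List Int × List Int := ([3, 1, 2], [2, 0, 1])

def Spec_verify_photo (team0 : List Int) (team1 : List Int) (out : Bool) : Prop := out = verify_photo_alt team0 team1
instance (team0 : List Int) (team1 : List Int) (out : Bool) : Decidable (Spec_verify_photo team0 team1 out) := by unfold Spec_verify_photo; infer_instance

-- ===== CLAIM (what is proved, stated in full; the proofs are below) =====
def Claim_equal_verify_photo : Prop := ∀ (team0 : List Int) (team1 : List Int), Dom_verify_photo team0 team1 → Pre_verify_photo team0 team1 → Spec_verify_photo team0 team1 (verify_photo team0 team1)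

-- ===== LEMMAS AND PROOFS =====

-- "team s0 dominates team s1 lockstep from index k on"
def Dominates (s0 s1 : List Int) (k : Nat) : Prop :=
  ∀ j, k ≤ j → j < s1.length → s1.getD j 0 ≤ s0.getD j 0

theorem pairwise_getD_mono {l : List Int} (hp : l.Pairwise (· ≤ ·))
    {p q : Nat} (hpq : p ≤ q) (hq : q < l.length) : l.getD p 0 ≤ l.getD q 0 := by
  rcases Nat.lt_or_ge p q with h | h
  · rw [List.getD_eq_getElem l 0 (by omega), List.getD_eq_getElem l 0 hq]
    exact (List.pairwise_iff_getElem.mp hp) p q (by omega) hq h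
  · have : p = q := by omega
    subst this; exact le_rfl

theorem loopA_iff (s0 s1 : List Int) (hs0 : s0.Pairwise (· ≤ ·))
    (hlen : s0.length = s1.length) :
    ∀ n i0 i1, (s0.length - i0) + (s1.length - i1) ≤ n → i0 ≤ i1 →
      (verifyLoopA s0 s1 i0 i1 = true ↔ Dominates s0 s1 i1) := by
  intro n
  induction n with
  | zero =>
    intro i0 i1 hb hle
    have h1 : ¬ i1 < s1.length := by omega
    rw [verifyLoopA]
    simp only [dif_neg h1]
    constructor
    · intro _ j hj hj'; omega
    · intro _; trivial
  | succ n ih =>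
    intro i0 i1 hb hle
    by_cases h1 : i1 < s1.length
    · have h0 : i0 < s0.length := by omega
      rw [verifyLoopA]
      simp only [dif_pos h1, dif_pos h0]
      by_cases hgt : s0[i0] > s1[i1]
      · rw [if_pos hgt, if_neg (show ¬ i1 + 1 < i0 by omega),
            ih i0 (i1 + 1) (by omega) (by omega)]
        constructor
        · intro h j hj hj'
          rcases Nat.lt_or_ge i1 j with hc | hc
          · exact h j hc hj'
          · have hji : j = i1 := by omega
            subst hji
            have h01 : s0.getD i0 0 ≤ s0.getD j 0 := pairwise_getD_mono hs0 hle (by omega)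
            have hg0 : s0.getD i0 0 = s0[i0] := List.getD_eq_getElem s0 0 h0
            have hg1 : s1.getD j 0 = s1[j] := List.getD_eq_getElem s1 0 hj'
            omega
        · intro h j hj hj'; exact h j (by omega) hj'
      · by_cases hgt' : s1[i1] > s0[i0]
        · rw [if_neg hgt, if_pos hgt']
          by_cases hr : i1 < i0 + 1
          · rw [if_pos hr]
            have hi : i0 = i1 := by omega
            subst hi
            constructor
            · intro h; exact absurd h (by simp)
            · intro h
              exfalso
              have := h i0 le_rfl h1
              have hg0 : s0.getD i0 0 = s0[i0] := List.getD_eq_getElem s0 0 h0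
              have hg1 : s1.getD i0 0 = s1[i0] := List.getD_eq_getElem s1 0 h1
              omega
          · rw [if_neg hr]
            exact ih (i0 + 1) i1 (by omega) (by omega)
        · rw [if_neg hgt, if_neg hgt', if_neg (show ¬ i1 + 1 < i0 + 1 by omega),
              ih (i0 + 1) (i1 + 1) (by omega) (by omega)]
          constructor
          · intro h j hj hj'
            rcases Nat.lt_or_ge i1 j with hc | hc
            · exact h j hc hj'
            · have hji : j = i1 := by omega
              subst hji
              have h01 : s0.getD i0 0 ≤ s0.getD j 0 := pairwise_getD_mono hs0 hle (by omega)
              have hg0 : s0.getD i0 0 = s0[i0] := List.getD_eq_getElem s0 0 h0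
              have hg1 : s1.getD j 0 = s1[j] := List.getD_eq_getElem s1 0 hj'
              omega
          · intro h j hj hj'; exact h j (by omega) hj'
    · rw [verifyLoopA]
      simp only [dif_neg h1]
      constructor
      · intro _ j hj hj'; omega
      · intro _; trivial

theorem zipAll_iff (s0 s1 : List Int) (hlen : s0.length = s1.length) :
    ((s0.zip s1).all (fun p => p.1 ≥ p.2) = true ↔ Dominates s0 s1 0) := by
  rw [List.all_eq_true]
  constructor
  · intro h j _ hj'
    have hj0 : j < s0.length := by omega
    have hz : j < (s0.zip s1).length := by simp [List.length_zip]; omega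
    have := h ((s0.zip s1)[j]) (List.getElem_mem hz)
    simp only [List.getElem_zip] at this
    rw [List.getD_eq_getElem s0 0 hj0, List.getD_eq_getElem s1 0 hj']
    simpa using this
  · intro h p hp
    obtain ⟨j, hj, hpj⟩ := List.getElem_of_mem hp
    have hj0 : j < s0.length := by simp [List.length_zip] at hj; omega
    have hj1 : j < s1.length := by simp [List.length_zip] at hj; omega
    have := h j (Nat.zero_le _) hj1
    rw [List.getD_eq_getElem s0 0 hj0, List.getD_eq_getElem s1 0 hj1] at this
    rw [← hpj]
    simp only [List.getElem_zip]
    simpa using this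

-- the common trunk: both ports on sorted, oriented teams of equal length
theorem core_eq (s0 s1 : List Int) (hs0 : s0.Pairwise (· ≤ ·))
    (hlen : s0.length = s1.length) :
    verifyLoopA s0 s1 0 0 = (s0.zip s1).all (fun p => p.1 ≥ p.2) := by
  have h1 := loopA_iff s0 s1 hs0 hlen (s0.length + s1.length) 0 0 (by omega) le_rfl
  have h2 := zipAll_iff s0 s1 hlen
  by_cases h : Dominates s0 s1 0
  · rw [h1.mpr h, h2.mpr h]
  · have hv : verifyLoopA s0 s1 0 0 = false := by
      cases hv' : verifyLoopA s0 s1 0 0 with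
      | false => rfl
      | true => exact absurd (h1.mp hv') h
    have hz : ((s0.zip s1).all (fun p => p.1 ≥ p.2)) = false := by
      cases hz' : ((s0.zip s1).all (fun p => p.1 ≥ p.2)) with
      | false => rfl
      | true => exact absurd (h2.mp hz') h
    rw [hv, hz]

-- ===== VERDICT (by name: the statement is the Claim_ definition above) =====
theorem verify_photo_spec : Claim_equal_verify_photo := by
  intro team0 team1 _ hpre
  obtain ⟨hlen, hne⟩ := hpre
  unfold Spec_verify_photo
  have hp0 : (PySem.List.sorted team0 (fun x => x) false).Pairwise (fun a b => a ≤ b) := by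
    have := PySem.List.sorted_pairwise (xs := team0) (key := fun x => x)
    simpa using this
  have hp1 : (PySem.List.sorted team1 (fun x => x) false).Pairwise (fun a b => a ≤ b) := by
    have := PySem.List.sorted_pairwise (xs := team1) (key := fun x => x)
    simpa using this
  have hl0 : (PySem.List.sorted team0 (fun x => x) false).length = team0.length :=
    PySem.List.length_sorted ..
  have hl1 : (PySem.List.sorted team1 (fun x => x) false).length = team1.length :=
    PySem.List.length_sorted ..
  cases hg1 : PySem.List.pyGet? (PySem.List.sorted team1 (fun x => x) false) (-1) with
  | none =>
    cases hg0 : PySem.List.pyGet? (PySem.List.sorted team0 (fun x => x) false) (-1) <;>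
      simp only [verify_photo, verify_photo_alt, if_pos hlen, hg0, hg1]
  | some m1 =>
    cases hg0 : PySem.List.pyGet? (PySem.List.sorted team0 (fun x => x) false) (-1) with
    | none => simp only [verify_photo, verify_photo_alt, if_pos hlen, hg0, hg1]
    | some m0 =>
      simp only [verify_photo, verify_photo_alt, if_pos hlen, hg0, hg1]
      by_cases hsw : m1 > m0
      · rw [if_pos hsw, if_pos hsw]
        exact core_eq _ _ hp1 (by omega)
      · rw [if_neg hsw, if_neg hsw]
        exact core_eq _ _ hp0 (by omega)
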